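-- pv_equiv track=rewrite | github.com/ayushree/UCD-Thesis | train_tag.py | get_tag_seq
-- ===== SOURCE A (Python) =====
-- start_tag = '<start>'
--
-- end_tag = '<end>'
--
-- def get_tag_seq(address):
--     first_tag = start_tag + "-" + (address[0].split("/"))[1]
--     last_tag = (address[-1].split("/"))[1] + "-" + end_tag
--     tag_seq = [first_tag]
--     for i in range(len(address) - 1):
--         curr_tag = (address[i].split("/"))[1]
--         next_tag = (address[i + 1].split("/"))[1]
--         curr_tag_seq = curr_tag + "-" + next_tag
--         tag_seq.append(curr_tag_seq)
--     tag_seq.append(last_tag)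
--     return tag_seq
-- ===== SOURCE B (Python) =====
-- start_tag = '<start>'
--
-- end_tag = '<end>'
--
-- def get_tag_seq(address):
--     def walk(prev_tag, rest):
--         if not rest:
--             return [prev_tag + "-" + end_tag]
--         tag = rest[0].split("/")[1]
--         return [prev_tag + "-" + tag] + walk(tag, rest[1:])
--     return walk(start_tag, address)
-- ===== Notes on version B (the rewrite author's own statement) =====
-- stated objective: alternative
-- what changed: Replaces A's special-cased first/last tags plus an index loop over range(len-1) with a single recursive traversal that threads the previous tag through the list and emits each bigram as it goes, closing with the end sentinel at the base case.
import Mathlib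
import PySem

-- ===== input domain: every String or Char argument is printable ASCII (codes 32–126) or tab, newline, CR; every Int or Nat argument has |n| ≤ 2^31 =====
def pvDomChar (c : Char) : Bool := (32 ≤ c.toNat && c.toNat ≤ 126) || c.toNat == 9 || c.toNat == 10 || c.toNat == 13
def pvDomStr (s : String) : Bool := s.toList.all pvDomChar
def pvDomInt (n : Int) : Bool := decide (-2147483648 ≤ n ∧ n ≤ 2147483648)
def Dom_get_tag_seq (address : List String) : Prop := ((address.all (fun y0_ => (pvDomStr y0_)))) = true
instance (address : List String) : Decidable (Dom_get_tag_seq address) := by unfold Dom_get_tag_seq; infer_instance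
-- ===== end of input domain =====

-- B replaces A's special-cased first/last tags plus an index loop with one recursive traversal
-- that threads the previous tag and emits each bigram as it goes (objective: alternative; same O(n)).

-- ===== PORT A =====
-- tok.split("/")[1]; total form, used only under Pre_ (2 ≤ number of parts)
def pvTag (s : String) : String :=
  (PySem.List.pyGet? ((PySem.Str.split? s "/").getD []) 1).getD ""

def get_tag_seq (address : List String) : List String :=
  let first_tag := "<start>" ++ "-" ++ pvTag (PySem.List.pyGetD address 0 "")
  let last_tag := pvTag (PySem.List.pyGetD address (-1) "") ++ "-" ++ "<end>"
  let tag_seq := [first_tag]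
  let tag_seq := (PySem.List.pyRange 0 ((address.length : Int) - 1) 1).foldl
    (fun acc i =>
      let curr_tag := pvTag (PySem.List.pyGetD address i "")
      let next_tag := pvTag (PySem.List.pyGetD address (i + 1) "")
      acc ++ [curr_tag ++ "-" ++ next_tag]) tag_seq
  tag_seq ++ [last_tag]

-- ===== PORT B =====
-- walk(prev_tag, rest): recursion threading the previous tag through the list
def pvWalk : String → List String → List String
  | prev, [] => [prev ++ "-" ++ "<end>"]
  | prev, x :: r =>
    let tag := pvTag x
    [prev ++ "-" ++ tag] ++ pvWalk tag r

def get_tag_seq_alt (address : List String) : List String :=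
  pvWalk "<start>" address

-- ===== PRECONDITION & SPEC =====
-- Pre_ excludes exactly the inputs on which Python A raises IndexError:
-- the empty list (address[0]) and any token whose split("/") has fewer than 2 parts.
def Pre_get_tag_seq (address : List String) : Prop :=
  address ≠ [] ∧ ∀ s ∈ address, 2 ≤ ((PySem.Str.split? s "/").getD []).length
instance (address : List String) : Decidable (Pre_get_tag_seq address) := by
  unfold Pre_get_tag_seq; infer_instance

def pvWitness_get_tag_seq : List String := ["12/num", "main/street", "dublin/city"]

def Spec_get_tag_seq (address : List String) (out : List String) : Prop := out = get_tag_seq_alt address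
instance (address : List String) (out : List String) : Decidable (Spec_get_tag_seq address out) := by unfold Spec_get_tag_seq; infer_instance

-- ===== CLAIM (what is proved, stated in full; the proofs are below) =====
def Claim_equal_get_tag_seq : Prop := ∀ (address : List String), Dom_get_tag_seq address → Pre_get_tag_seq address → Spec_get_tag_seq address (get_tag_seq address)

-- ===== LEMMAS AND PROOFS =====

-- what B's recursion computes on a nonempty list, in zip-of-adjacent-pairs form
theorem pvWalk_pad (l : List String) (hl : l ≠ []) (a : String) :
    pvWalk a l =
      (a ++ "-" ++ pvTag l.headI) ::
        ((l.zip l.tail).map (fun p => pvTag p.1 ++ "-" ++ pvTag p.2) ++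
          [pvTag (l.getLast hl) ++ "-" ++ "<end>"]) := by
  induction l generalizing a with
  | nil => exact absurd rfl hl
  | cons x r ih =>
    cases r with
    | nil => rfl
    | cons y r' =>
      show (a ++ "-" ++ pvTag x) :: pvWalk (pvTag x) (y :: r') = _
      rw [ih (by simp)]
      simp [List.zip_cons_cons, List.getLast_cons]

theorem pvRangePairs (xs : List String) :
    (List.range (xs.length - 1)).map
        (fun k => pvTag (xs.getD k "") ++ "-" ++ pvTag (xs.getD (k + 1) "")) =
      (xs.zip xs.tail).map (fun p => pvTag p.1 ++ "-" ++ pvTag p.2) := by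
  induction xs with
  | nil => rfl
  | cons x r ih =>
    cases r with
    | nil => rfl
    | cons y r' =>
      rw [show (x :: y :: r').length - 1 = ((y :: r').length - 1) + 1 from by simp,
          List.range_succ_eq_map, List.map_cons, List.map_map]
      have hmap : ((List.range ((y :: r').length - 1)).map
          ((fun k => pvTag ((x :: y :: r').getD k "") ++ "-" ++ pvTag ((x :: y :: r').getD (k + 1) "")) ∘ Nat.succ))
          = (List.range ((y :: r').length - 1)).map
            (fun k => pvTag ((y :: r').getD k "") ++ "-" ++ pvTag ((y :: r').getD (k + 1) "")) := by
        apply List.map_congr_left; intro k _; simp [Function.comp]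
      rw [hmap, ih,
          show (x :: y :: r').zip (x :: y :: r').tail = (x, y) :: ((y :: r').zip r') from rfl]
      rfl

-- ===== VERDICT =====
theorem get_tag_seq_spec : Claim_equal_get_tag_seq := by
  intro address _hdom hpre
  unfold Spec_get_tag_seq
  obtain ⟨hne, -⟩ := hpre
  obtain ⟨x, xs, rfl⟩ := List.exists_cons_of_ne_nil hne
  unfold get_tag_seq get_tag_seq_alt
  dsimp only
  rw [pvWalk_pad _ (by simp)]
  -- A side: turn the foldl over pyRange into a map over List.range
  rw [show ((x :: xs).length : Int) - 1 = ((xs.length : Nat) : Int) from by simp,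
      PySem.List.pyRange_zero_nat,
      PySem.List.foldl_append_singleton_eq_map, List.map_map]
  have hbody : ((List.range xs.length).map
      ((fun i => pvTag (PySem.List.pyGetD (x :: xs) i "") ++ "-" ++
                 pvTag (PySem.List.pyGetD (x :: xs) (i + 1) "")) ∘ (fun k : Nat => (k : Int))))
      = (List.range ((x :: xs).length - 1)).map
        (fun k => pvTag ((x :: xs).getD k "") ++ "-" ++ pvTag ((x :: xs).getD (k + 1) "")) := by
    rw [show (x :: xs).length - 1 = xs.length from by simp]
    apply List.map_congr_left
    intro k _
    have h1 : ((k : Int) + 1) = ((k + 1 : Nat) : Int) := by push_cast; ring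
    simp only [Function.comp_apply]
    rw [h1]
    simp only [PySem.List.pyGetD_natCast]
  rw [hbody, pvRangePairs]
  simp [PySem.List.pyGetD_neg_one, PySem.List.pyGetD_zero_cons, List.headI]
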